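-- pv_equiv track=rewrite | github.com/asdf1414/100DaysOfCode | problem_001.py | check
-- ===== SOURCE A (Python) =====
-- def check(num_list, k):
--     # create new list without numbers > k
--     reduced_nums = [num for num in num_list if num <= k]
--
--     # sort numbers ascending
--     sorted_nums = sorted(reduced_nums)
--
--     while True:
--         # end function if list is empty
--         if not sorted_nums: return False
--
--         # take last number from list
--         last = sorted_nums[-1]
--
--         # search for remaining amount from (k - last) in list
--         if (k - last) in sorted_nums:
--             return True
--         else:
--             # remove last integer and redo loop
--             sorted_nums = sorted_nums[:-1]
-- ===== SOURCE B (Python) =====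
-- def check(num_list, k):
--     vals = {num for num in num_list if num <= k}
--     return any(k - v in vals for v in vals)
-- ===== Notes on version B (the rewrite author's own statement) =====
-- stated objective: faster
-- what changed: Replaced the sort + repeated linear membership scans over shrinking list slices with a single hash set of the filtered values and one membership pass.
import Mathlib
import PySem

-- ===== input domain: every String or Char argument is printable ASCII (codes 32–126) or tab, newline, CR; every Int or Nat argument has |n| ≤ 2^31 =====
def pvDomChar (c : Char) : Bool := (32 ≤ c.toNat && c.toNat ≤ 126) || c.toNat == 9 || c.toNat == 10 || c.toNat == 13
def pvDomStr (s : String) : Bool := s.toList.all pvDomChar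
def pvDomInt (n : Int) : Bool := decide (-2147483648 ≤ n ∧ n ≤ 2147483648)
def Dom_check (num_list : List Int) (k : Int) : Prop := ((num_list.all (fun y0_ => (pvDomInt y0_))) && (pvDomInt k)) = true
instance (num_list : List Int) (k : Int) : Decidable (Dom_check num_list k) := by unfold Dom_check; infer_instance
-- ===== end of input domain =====

-- B replaces A's sort + repeated membership scans over shrinking slices by one hash set
-- of the filtered values and a single membership pass (objective: faster; asymptotic, O(n^2) worst case vs O(n)).

-- ===== PORT A =====
-- the 'while True' loop of A: test the last element, else drop it (sorted_nums[:-1]) and redo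
def checkLoop (k : Int) (xs : List Int) : Bool :=
  if h : xs.isEmpty then false
  else
    match PySem.List.pyGet? xs (-1) with
    | none => false
    | some last =>
      if xs.contains (k - last) then true
      else checkLoop k (PySem.List.slice xs none (some (-1)))
termination_by xs.length
decreasing_by
  simp only [PySem.List.slice_to_neg_one, List.length_dropLast]
  simp only [List.isEmpty_iff] at h
  have : xs.length ≠ 0 := by simpa [List.length_eq_zero_iff] using h
  omega

def check (num_list : List Int) (k : Int) : Bool :=
  let reduced_nums := num_list.filter (fun num => num ≤ k)
  let sorted_nums := PySem.List.sorted reduced_nums (fun x => x) false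
  checkLoop k sorted_nums

-- ===== PORT B =====
def check_alt (num_list : List Int) (k : Int) : Bool :=
  let vals : PySem.Set Int := PySem.Set.ofList (num_list.filter (fun num => num ≤ k))
  vals.any (fun v => PySem.Set.contains vals (k - v))

-- ===== PRECONDITION & SPEC =====
def Spec_check (num_list : List Int) (k : Int) (out : Bool) : Prop := out = check_alt num_list k
instance (num_list : List Int) (k : Int) (out : Bool) : Decidable (Spec_check num_list k out) := by unfold Spec_check; infer_instance

-- ===== CLAIM (what is proved, stated in full; the proofs are below) =====
def Claim_equal_check : Prop := ∀ (num_list : List Int) (k : Int), Dom_check num_list k → Spec_check num_list k (check num_list k)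

-- ===== LEMMAS AND PROOFS =====

-- A's loop answers exactly "some value x of xs has k - x in xs".
theorem checkLoop_eq (k : Int) : ∀ (n : Nat) (xs : List Int), xs.length ≤ n →
    checkLoop k xs = xs.any (fun x => xs.contains (k - x)) := by
  intro n
  induction n with
  | zero =>
    intro xs hlen
    have hxs : xs = [] := List.length_eq_zero_iff.mp (Nat.le_zero.mp hlen)
    subst hxs
    rw [checkLoop]
    rfl
  | succ m ih =>
    intro xs hlen
    rcases List.eq_nil_or_concat xs with hnil | ⟨ys, l, rfl⟩
    · subst hnil
      rw [checkLoop]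
      rfl
    · simp only [List.concat_eq_append] at hlen ⊢
      rw [checkLoop]
      rw [dif_neg (by simp)]
      rw [PySem.List.pyGet?_neg_one, List.getLast?_concat]
      dsimp only
      by_cases hmem : (ys ++ [l]).contains (k - l)
      · rw [if_pos hmem]
        have : (ys ++ [l]).any (fun x => (ys ++ [l]).contains (k - x)) = true := by
          simp only [List.any_eq_true]
          exact ⟨l, by simp, hmem⟩
        exact this.symm
      · rw [if_neg hmem]
        rw [PySem.List.slice_to_neg_one]
        have hdl : (ys ++ [l]).dropLast = ys := by simp
        rw [hdl]
        have hlen' : ys.length ≤ m := by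
          simp only [List.length_append, List.length_cons, List.length_nil] at hlen
          omega
        rw [ih ys hlen']
        -- the dropped maximal-position value l cannot participate: k - l ∉ xs
        have hm : (k - l) ∉ (ys ++ [l]) := by simpa using hmem
        apply Bool.eq_iff_iff.mpr
        simp only [List.any_eq_true, List.contains_iff_mem]
        constructor
        · rintro ⟨x, hx, hkx⟩
          exact ⟨x, List.mem_append_left _ hx, List.mem_append_left _ hkx⟩
        · rintro ⟨x, hx, hkx⟩
          have hxne : x ≠ l := by
            rintro rfl
            exact hm hkx
          have hkxne : k - x ≠ l := by
            intro h
            have : x = k - l := by omega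
            subst this
            exact hm hx
          have hx' : x ∈ ys := by
            rcases List.mem_append.mp hx with h | h
            · exact h
            · simp at h; exact absurd h hxne
          have hkx' : (k - x) ∈ ys := by
            rcases List.mem_append.mp hkx with h | h
            · exact h
            · simp at h; exact absurd h hkxne
          exact ⟨x, hx', hkx'⟩

-- ===== VERDICT (by name: the statement is the Claim_ definition above) =====
theorem check_spec : Claim_equal_check := by
  intro num_list k _
  unfold Spec_check check check_alt
  rw [checkLoop_eq k _ _ (le_refl _)]
  apply Bool.eq_iff_iff.mpr
  simp only [List.any_eq_true, List.contains_iff_mem, PySem.Set.contains,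
    PySem.List.mem_sorted, PySem.Set.mem_ofList, List.contains_iff_mem]
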